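-- pv_equiv track=rewrite | github.com/pypi-data/pypi-mirror-398 | packages/nonebot-plugin-jrrp3/nonebot_plugin_jrrp3-3.3.2-py3-none-any.whl/nonebot_plugin_jrrp3/loader.py | _calculate_min_max_from_ranges
-- ===== SOURCE A (Python) =====
-- from typing import Dict, Any, Tuple
--
-- MIN_SAFE_VALUE = -1000000
--
-- MAX_SAFE_VALUE = 1000000
--
-- def _calculate_min_max_from_ranges(ranges_config: list) -> Tuple[int, int]:
--     """从运势范围配置中计算实际的最小值和最大值
--
--     Args:
--         ranges_config: 运势范围配置列表
--
--     Returns: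
--         Tuple[int, int]: (实际最小值, 实际最大值)
--     """
--     if not ranges_config or not isinstance(ranges_config, list):
--         return MIN_SAFE_VALUE, MAX_SAFE_VALUE
--
--     # 收集所有范围的最小和最大值
--     mins = []
--     maxs = []
--
--     for range_info in ranges_config:
--         if isinstance(range_info, dict) and 'min' in range_info and 'max' in range_info:
--             mins.append(range_info['min'])
--             maxs.append(range_info['max'])
--
--     if not mins or not maxs:
--         return MIN_SAFE_VALUE, MAX_SAFE_VALUE
--
--     # 返回最小的最小值和最大的最大值
--     return min(mins), max(maxs)
-- ===== SOURCE B (Python) =====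
-- from typing import Tuple
--
-- MIN_SAFE_VALUE = -1000000
-- MAX_SAFE_VALUE = 1000000
--
-- def _calculate_min_max_from_ranges(ranges_config: list) -> Tuple[int, int]:
--     """Single pass keeping running min/max instead of collecting lists."""
--     if not ranges_config or not isinstance(ranges_config, list):
--         return MIN_SAFE_VALUE, MAX_SAFE_VALUE
--     best = None
--     for range_info in ranges_config:
--         if isinstance(range_info, dict) and 'min' in range_info and 'max' in range_info:
--             if best is None:
--                 best = (range_info['min'], range_info['max'])
--             else:
--                 best = (min(best[0], range_info['min']), max(best[1], range_info['max']))
--     if best is None: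
--         return MIN_SAFE_VALUE, MAX_SAFE_VALUE
--     return best
-- ===== Notes on version B (the rewrite author's own statement) =====
-- stated objective: simpler
-- what changed: Replaces the collect-two-lists-then-min/max pass with a single loop maintaining a running (min, max) pair in an optional accumulator, so no intermediate lists are built.
import Mathlib
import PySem

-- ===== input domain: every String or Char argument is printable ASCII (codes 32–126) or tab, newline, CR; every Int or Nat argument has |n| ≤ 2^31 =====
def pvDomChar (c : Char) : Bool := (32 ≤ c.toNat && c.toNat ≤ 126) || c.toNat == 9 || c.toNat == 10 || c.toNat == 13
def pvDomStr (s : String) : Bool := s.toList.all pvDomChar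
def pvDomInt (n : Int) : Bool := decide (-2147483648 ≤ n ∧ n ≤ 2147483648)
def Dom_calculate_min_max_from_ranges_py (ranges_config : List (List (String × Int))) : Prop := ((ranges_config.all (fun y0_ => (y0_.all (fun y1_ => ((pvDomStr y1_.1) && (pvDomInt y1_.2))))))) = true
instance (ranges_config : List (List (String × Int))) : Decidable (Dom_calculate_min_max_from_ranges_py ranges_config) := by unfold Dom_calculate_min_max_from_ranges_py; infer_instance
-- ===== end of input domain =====

-- B replaces A's collect-two-lists-then-min/max with one pass keeping a running (min, max) pair; objective: simpler.

-- ===== PORT A =====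
-- A: collect all 'min' values and all 'max' values into two lists, then take min/max of those lists.
def calculate_min_max_from_ranges_py (ranges_config : List (List (String × Int))) : Int × Int :=
  if ranges_config = [] then (-1000000, 1000000)
  else
    let acc := ranges_config.foldl
      (fun (acc : List Int × List Int) range_info =>
        match (PySem.Dict.mk range_info).get? "min", (PySem.Dict.mk range_info).get? "max" with
        | some vmin, some vmax => (acc.1 ++ [vmin], acc.2 ++ [vmax])
        | _, _ => acc)
      ([], [])
    if acc.1 = [] ∨ acc.2 = [] then (-1000000, 1000000)
    else
      match PySem.List.min? acc.1 id, PySem.List.max? acc.2 id with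
      | some m, some M => (m, M)
      | _, _ => (-1000000, 1000000)  -- unreachable: both lists nonempty here

-- ===== PORT B =====
-- B: one pass with an optional running (best_min, best_max) pair.
def calculate_min_max_from_ranges_py_alt (ranges_config : List (List (String × Int))) : Int × Int :=
  if ranges_config = [] then (-1000000, 1000000)
  else
    match ranges_config.foldl
      (fun (best : Option (Int × Int)) range_info =>
        if (PySem.Dict.mk range_info).contains "min" && (PySem.Dict.mk range_info).contains "max" then
          -- keys are present here, so the .getD 0 defaults are never used
          match best with
          | none => some (((PySem.Dict.mk range_info).get? "min").getD 0,
                          ((PySem.Dict.mk range_info).get? "max").getD 0)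
          | some (m, M) => some (min m (((PySem.Dict.mk range_info).get? "min").getD 0),
                                 max M (((PySem.Dict.mk range_info).get? "max").getD 0))
        else best)
      none with
    | none => (-1000000, 1000000)
    | some best => best

-- ===== PRECONDITION & SPEC =====
def Spec_calculate_min_max_from_ranges_py (ranges_config : List (List (String × Int))) (out : Int × Int) : Prop := out = calculate_min_max_from_ranges_py_alt ranges_config
instance (ranges_config : List (List (String × Int))) (out : Int × Int) : Decidable (Spec_calculate_min_max_from_ranges_py ranges_config out) := by unfold Spec_calculate_min_max_from_ranges_py; infer_instance

-- ===== CLAIM (what is proved, stated in full; the proofs are below) =====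
def Claim_equal_calculate_min_max_from_ranges_py : Prop := ∀ (ranges_config : List (List (String × Int))), Dom_calculate_min_max_from_ranges_py ranges_config → Spec_calculate_min_max_from_ranges_py ranges_config (calculate_min_max_from_ranges_py ranges_config)

-- ===== LEMMAS AND PROOFS =====

-- the per-element extraction both loops branch on
def pvExtract (range_info : List (String × Int)) : Option (Int × Int) :=
  match (PySem.Dict.mk range_info).get? "min", (PySem.Dict.mk range_info).get? "max" with
  | some vmin, some vmax => some (vmin, vmax)
  | _, _ => none

lemma foldA_eq (l : List (List (String × Int))) :
    ∀ acc : List Int × List Int,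
      l.foldl
        (fun (acc : List Int × List Int) range_info =>
          match (PySem.Dict.mk range_info).get? "min", (PySem.Dict.mk range_info).get? "max" with
          | some vmin, some vmax => (acc.1 ++ [vmin], acc.2 ++ [vmax])
          | _, _ => acc)
        acc
      = (acc.1 ++ (l.filterMap pvExtract).map Prod.fst,
         acc.2 ++ (l.filterMap pvExtract).map Prod.snd) := by
  induction l with
  | nil => simp
  | cons r tl ih =>
    intro acc
    simp only [List.foldl_cons, List.filterMap_cons]
    unfold pvExtract
    cases hmin : (PySem.Dict.mk r).get? "min" with
    | none => simp [ih acc]; exact ⟨rfl, rfl⟩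
    | some vmin =>
      cases hmax : (PySem.Dict.mk r).get? "max" with
      | none => simp [ih acc]; exact ⟨rfl, rfl⟩
      | some vmax =>
        simp only [ih (acc.1 ++ [vmin], acc.2 ++ [vmax])]
        simp
        exact ⟨rfl, rfl⟩

lemma foldB_eq (l : List (List (String × Int))) :
    ∀ best : Option (Int × Int),
      l.foldl
        (fun (best : Option (Int × Int)) range_info =>
          if (PySem.Dict.mk range_info).contains "min" && (PySem.Dict.mk range_info).contains "max" then
            match best with
            | none => some (((PySem.Dict.mk range_info).get? "min").getD 0,
                            ((PySem.Dict.mk range_info).get? "max").getD 0)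
            | some (m, M) => some (min m (((PySem.Dict.mk range_info).get? "min").getD 0),
                                   max M (((PySem.Dict.mk range_info).get? "max").getD 0))
          else best)
        best
      = (l.filterMap pvExtract).foldl
          (fun best p =>
            match best with
            | none => some p
            | some (m, M) => some (min m p.1, max M p.2))
          best := by
  induction l with
  | nil => simp
  | cons r tl ih =>
    intro best
    simp only [List.foldl_cons, List.filterMap_cons]
    unfold pvExtract
    rw [PySem.Dict.contains_eq_isSome_get? (PySem.Dict.mk r) "min",
        PySem.Dict.contains_eq_isSome_get? (PySem.Dict.mk r) "max"]
    cases hmin : (PySem.Dict.mk r).get? "min" with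
    | none => simpa using ih best
    | some vmin =>
      cases hmax : (PySem.Dict.mk r).get? "max" with
      | none => simpa using ih best
      | some vmax =>
        simp only [Option.isSome_some, Bool.and_self, if_true, Option.getD_some]
        cases best with
        | none => exact ih (some (vmin, vmax))
        | some p => cases p with | mk m M => exact ih (some (min m vmin, max M vmax))

lemma foldB_some (ps : List (Int × Int)) :
    ∀ m M : Int,
      ps.foldl
        (fun best p =>
          match best with
          | none => some p
          | some (m, M) => some (min m p.1, max M p.2))
        (some (m, M))
      = some ((ps.map Prod.fst).foldl min m, (ps.map Prod.snd).foldl max M) := by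
  induction ps with
  | nil => simp
  | cons p tl ih => intro m M; simpa using ih (min m p.1) (max M p.2)

lemma min?_cons_int (xs : List Int) : ∀ x : Int,
    PySem.List.min? (x :: xs) id = some (xs.foldl min x) := by
  induction xs with
  | nil => intro x; rfl
  | cons y tl ih =>
    intro x
    have h1 : PySem.List.min? (x :: y :: tl) id = PySem.List.min? (min x y :: tl) id := by
      simp only [PySem.List.min?, List.foldl_cons, id]
      by_cases h : y < x
      · simp [h, min_eq_right (le_of_lt h)]
      · simp [h, min_eq_left (by omega : x ≤ y)]
    rw [h1, ih (min x y)]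
    simp

lemma max?_cons_int (xs : List Int) : ∀ x : Int,
    PySem.List.max? (x :: xs) id = some (xs.foldl max x) := by
  induction xs with
  | nil => intro x; rfl
  | cons y tl ih =>
    intro x
    have h1 : PySem.List.max? (x :: y :: tl) id = PySem.List.max? (max x y :: tl) id := by
      simp only [PySem.List.max?, List.foldl_cons, id]
      by_cases h : x < y
      · simp [h, max_eq_right (le_of_lt h)]
      · simp [h, max_eq_left (by omega : y ≤ x)]
    rw [h1, ih (max x y)]
    simp

-- ===== VERDICT (by name: the statement is the Claim_ definition above) =====
theorem calculate_min_max_from_ranges_py_spec : Claim_equal_calculate_min_max_from_ranges_py := by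
  intro l _
  unfold Spec_calculate_min_max_from_ranges_py
  unfold calculate_min_max_from_ranges_py calculate_min_max_from_ranges_py_alt
  by_cases hl : l = []
  · simp [hl]
  · simp only [hl, if_false]
    rw [foldA_eq, foldB_eq]
    cases hps : l.filterMap pvExtract with
    | nil => simp
    | cons p tl =>
      cases p with
      | mk a b =>
        simp only [List.foldl_cons, List.map_cons, List.nil_append]
        rw [foldB_some]
        simp only [min?_cons_int, max?_cons_int]
        simp
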